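-- pv_equiv track=rewrite | github.com/Kavaldrin/AoC2018 | 5/_5.py | taskBhelper
-- ===== SOURCE A (Python) =====
-- def taskBhelper(data,notC):
--     difference = ord('a') - ord('A')
--     stack = []
--     for c in data:
--         if difference + ord(c) != notC and ord(c) != notC:
--             if len(stack) == 0:
--                 stack.append(c)
--             elif c != stack[-1] and (ord(c)+difference == ord(stack[-1]) or ord(c) == ord(stack[-1]) + difference):
--                 stack.pop()
--             else:
--                 stack.append(c)
--
--     return len(stack)
-- ===== SOURCE B (Python) =====
-- def taskBhelper(data, notC):
--     # Filter out the removed unit type first, working on ordinal values,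
--     # then reduce in place with a backtracking index scan.
--     units = [ord(c) for c in data if ord(c) != notC and ord(c) != notC - 32]
--     i = 0
--     while i + 1 < len(units):
--         if abs(units[i] - units[i + 1]) == 32:
--             del units[i:i + 2]
--             i = i - 1 if i else 0
--         else:
--             i += 1
--     return len(units)
-- ===== Notes on version B (the rewrite author's own statement) =====
-- stated objective: alternative
-- what changed: B first filters the removed unit type into a list of ordinal ints in one comprehension, then reduces by an in-place backtracking index scan (compare neighbours, delete the reacting pair with del and step the index back) instead of A's single pass pushing/popping characters on an explicit stack.
import Mathlib
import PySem

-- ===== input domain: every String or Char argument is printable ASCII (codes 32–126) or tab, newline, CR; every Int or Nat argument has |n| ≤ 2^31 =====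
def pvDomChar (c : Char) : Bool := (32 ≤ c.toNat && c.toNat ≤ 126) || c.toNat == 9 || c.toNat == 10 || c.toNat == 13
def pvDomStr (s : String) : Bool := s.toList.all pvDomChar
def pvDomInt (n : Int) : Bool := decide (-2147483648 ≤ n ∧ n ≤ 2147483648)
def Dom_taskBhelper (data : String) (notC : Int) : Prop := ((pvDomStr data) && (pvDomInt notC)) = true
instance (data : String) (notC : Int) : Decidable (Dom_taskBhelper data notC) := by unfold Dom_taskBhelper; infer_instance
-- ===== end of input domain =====

-- B replaces A's single-pass character stack with a prefilter into ordinal ints followed by an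
-- in-place backtracking index scan (delete each reacting neighbour pair, step back); same results, alternative structure.


-- ord(c) as Python's int
def pvOrd (c : Char) : Int := c.toNat

-- ===== PORT A =====
-- one iteration of A's for-loop body (difference = ord('a') - ord('A') = 32); stack[-1] = getLast?, pop = dropLast
def taskBhelperStep (notC : Int) (stack : List Char) (c : Char) : List Char :=
  if (pvOrd 'a' - pvOrd 'A') + pvOrd c ≠ notC ∧ pvOrd c ≠ notC then
    match stack.getLast? with
    | none => stack ++ [c]
    | some t =>
        if c ≠ t ∧ (pvOrd c + (pvOrd 'a' - pvOrd 'A') = pvOrd t ∨ pvOrd c = pvOrd t + (pvOrd 'a' - pvOrd 'A')) then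
          stack.dropLast
        else stack ++ [c]
  else stack

def taskBhelper (data : String) (notC : Int) : Int :=
  ((data.toList.foldl (taskBhelperStep notC) []).length : Int)

-- ===== PORT B =====
-- Source B's while-loop: compare units[i] with units[i+1]; on a reaction `del units[i:i+2]` (= take i ++ drop (i+2),
-- exact since 0 ≤ i < i+2 and i+1 < len) and step back (`i = i - 1 if i else 0` = Nat subtraction), else advance.
def taskBhelperScan (fuel : Nat) (units : List Int) (i : Nat) : Int :=
  match fuel with
  | 0 => (units.length : Int)   -- fuel 2*len suffices (see scan_eq_stack); never reached mid-scan
  | fuel + 1 =>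
    if h : i + 1 < units.length then
      if ((units[i]'(by omega)) - units[i + 1]).natAbs = 32 then
        taskBhelperScan fuel (units.take i ++ units.drop (i + 2)) (i - 1)
      else
        taskBhelperScan fuel units (i + 1)
    else
      (units.length : Int)

def taskBhelper_alt (data : String) (notC : Int) : Int :=
  let units := (data.toList.filter (fun c => decide (pvOrd c ≠ notC ∧ pvOrd c ≠ notC - 32))).map pvOrd
  taskBhelperScan (2 * units.length) units 0

-- ===== PRECONDITION & SPEC =====
def Spec_taskBhelper (data : String) (notC : Int) (out : Int) : Prop := out = taskBhelper_alt data notC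
instance (data : String) (notC : Int) (out : Int) : Decidable (Spec_taskBhelper data notC out) := by unfold Spec_taskBhelper; infer_instance

-- ===== CLAIM (what is proved, stated in full; the proofs are below) =====
def Claim_equal_taskBhelper : Prop := ∀ (data : String) (notC : Int), Dom_taskBhelper data notC → Spec_taskBhelper data notC (taskBhelper data notC)

-- ===== LEMMAS AND PROOFS =====

theorem pvOrd_a : pvOrd 'a' = 97 := by decide
theorem pvOrd_A : pvOrd 'A' = 65 := by decide

theorem foldA_eq_filter (notC : Int) : ∀ (l : List Char) (s : List Char),
    l.foldl (taskBhelperStep notC) s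
      = (l.filter (fun c => decide ((pvOrd 'a' - pvOrd 'A') + pvOrd c ≠ notC ∧ pvOrd c ≠ notC))).foldl
          (taskBhelperStep notC) s := by
  intro l
  induction l with
  | nil => intro s; rfl
  | cons c l ih =>
    intro s
    by_cases hk : (pvOrd 'a' - pvOrd 'A') + pvOrd c ≠ notC ∧ pvOrd c ≠ notC
    · simp [hk, List.foldl_cons, ih]
    · have h0 : taskBhelperStep notC s c = s := by simp [taskBhelperStep, hk]
      simp [hk, List.foldl_cons, h0, ih]

theorem filter_congr_keep (notC : Int) (l : List Char) :
    l.filter (fun c => decide ((pvOrd 'a' - pvOrd 'A') + pvOrd c ≠ notC ∧ pvOrd c ≠ notC))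
      = l.filter (fun c => decide (pvOrd c ≠ notC ∧ pvOrd c ≠ notC - 32)) := by
  apply List.filter_congr
  intro c _
  simp only [decide_eq_decide, pvOrd_a, pvOrd_A]
  constructor <;> (rintro ⟨h1, h2⟩; exact ⟨by omega, by omega⟩)

theorem react_iff (c t : Char) :
    (c ≠ t ∧ (pvOrd c + (pvOrd 'a' - pvOrd 'A') = pvOrd t ∨ pvOrd c = pvOrd t + (pvOrd 'a' - pvOrd 'A')))
      ↔ (pvOrd c - pvOrd t).natAbs = 32 := by
  rw [pvOrd_a, pvOrd_A]
  constructor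
  · rintro ⟨-, h⟩
    simp only [pvOrd] at h ⊢
    omega
  · intro h
    refine ⟨?_, ?_⟩
    · rintro rfl
      simp [pvOrd] at h
    · simp only [pvOrd] at h ⊢
      omega
def stepH (s : List Int) (c : Int) : List Int :=
  match s with
  | [] => [c]
  | t :: s' => if (c - t).natAbs = 32 then s' else c :: t :: s'

theorem step_rev (notC : Int) (s : List Char) (c : Char)
    (hk : (pvOrd 'a' - pvOrd 'A') + pvOrd c ≠ notC ∧ pvOrd c ≠ notC) :
    (taskBhelperStep notC s c).reverse.map pvOrd = stepH (s.reverse.map pvOrd) (pvOrd c) := by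
  rcases s.eq_nil_or_concat with rfl | ⟨r, t, rfl⟩
  · simp [taskBhelperStep, hk, stepH]
  · by_cases hr : (c ≠ t ∧ (pvOrd c + (pvOrd 'a' - pvOrd 'A') = pvOrd t ∨ pvOrd c = pvOrd t + (pvOrd 'a' - pvOrd 'A')))
    · have h32 := (react_iff c t).mp hr
      simp [taskBhelperStep, hk, hr, stepH, h32]
    · have h32 : ¬ (pvOrd c - pvOrd t).natAbs = 32 := fun hh => hr ((react_iff c t).mpr hh)
      simp [taskBhelperStep, hk, hr, stepH, h32]

theorem foldA_rev (notC : Int) : ∀ (l : List Char) (s : List Char),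
    (∀ c ∈ l, (pvOrd 'a' - pvOrd 'A') + pvOrd c ≠ notC ∧ pvOrd c ≠ notC) →
    (l.foldl (taskBhelperStep notC) s).reverse.map pvOrd
      = (l.map pvOrd).foldl stepH (s.reverse.map pvOrd) := by
  intro l
  induction l with
  | nil => intro s _; rfl
  | cons c l ih =>
    intro s hl
    have hk := hl c (by simp)
    have hrest : ∀ c' ∈ l, (pvOrd 'a' - pvOrd 'A') + pvOrd c' ≠ notC ∧ pvOrd c' ≠ notC :=
      fun c' hc' => hl c' (by simp [hc'])
    simp only [List.foldl_cons, List.map_cons]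
    rw [← step_rev notC s c hk]
    -- need: stack after step, expressed as reverse of something; rewrite via reverse_reverse
    have := ih (taskBhelperStep notC s c) hrest
    rw [this]

theorem foldH_shift (u : List Int) :
    List.foldl stepH [] u = List.foldl stepH (u.take 1).reverse (u.drop 1) := by
  cases u with
  | nil => rfl
  | cons c r => simp [stepH, List.foldl_cons]
theorem take_succ_getElem {α : Type} (l : List α) (i : Nat) (h : i < l.length) :
    l.take (i + 1) = l.take i ++ [l[i]] := by
  rw [List.take_add_one]
  simp [List.getElem?_eq_getElem h]

theorem isChain_take_one {α : Type} (R : α → α → Prop) (u : List α) :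
    List.IsChain R (u.take 1) := by
  cases u with
  | nil => exact List.IsChain.nil
  | cons a t =>
    rw [show (a :: t).take 1 = [a] from rfl]
    exact List.isChain_singleton a

theorem scan_eq_stack : ∀ (fuel : Nat) (l : List Int) (i : Nat),
    2 * l.length ≤ fuel + i →
    List.IsChain (fun a b => ¬ (a - b).natAbs = 32) (l.take (i + 1)) →
    taskBhelperScan fuel l i = ((List.foldl stepH (l.take (i + 1)).reverse (l.drop (i + 1))).length : Int) := by
  intro fuel
  induction fuel with
  | zero =>
    intro l i hf _
    have hd : l.drop (i + 1) = [] := List.drop_eq_nil_iff.mpr (by omega)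
    have ht : l.take (i + 1) = l := List.take_of_length_le (by omega)
    rw [taskBhelperScan, hd, ht]
    simp
  | succ fuel ih =>
    intro l i hf hc
    rw [taskBhelperScan]
    by_cases h : i + 1 < l.length
    · rw [dif_pos h]
      have hi : i < l.length := by omega
      have htake : l.take (i + 1) = l.take i ++ [l[i]] := take_succ_getElem l i hi
      have hdrop : l.drop (i + 1) = l[i + 1] :: l.drop (i + 2) := List.drop_eq_getElem_cons h
      have hpop : (l.take (i + 1)).reverse = l[i] :: (l.take i).reverse := by
        rw [htake, List.reverse_append]; rfl
      by_cases hr : (l[i] - l[i + 1]).natAbs = 32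
      · rw [if_pos hr]
        have h32 : (l[i + 1] - l[i]).natAbs = 32 := by omega
        have hstep : List.foldl stepH (l.take (i + 1)).reverse (l.drop (i + 1))
            = List.foldl stepH (l.take i).reverse (l.drop (i + 2)) := by
          rw [hdrop, hpop, List.foldl_cons, stepH, if_pos h32]
        rw [hstep]
        have hlen : (l.take i).length = i := by simp; omega
        have hflen : (l.take i ++ l.drop (i + 2)).length = l.length - 2 := by
          simp only [List.length_append, List.length_take, List.length_drop]; omega
        rcases Nat.eq_zero_or_pos i with rfl | hpos
        · rw [ih _ _ (by omega) (isChain_take_one _ _)]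
          simp only [List.take_zero, List.nil_append, List.reverse_nil, Nat.zero_add]
          rw [← foldH_shift (l.drop 2)]
        · have e1 : i - 1 + 1 = i := by omega
          have e2 : (l.take i ++ l.drop (i + 2)).take i = l.take i := List.take_left' hlen
          have e3 : (l.take i ++ l.drop (i + 2)).drop i = l.drop (i + 2) := List.drop_left' hlen
          have hci : List.IsChain (fun a b => ¬ (a - b).natAbs = 32) (l.take i) := by
            have h' := hc.take i
            rw [List.take_take] at h'
            rwa [Nat.min_eq_left (by omega : i ≤ i + 1)] at h'
          rw [ih _ _ (by omega) (by rw [e1, e2]; exact hci), e1, e2, e3]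
      · rw [if_neg hr]
        have htake2 : l.take (i + 2) = l.take (i + 1) ++ [l[i + 1]] := take_succ_getElem l (i + 1) h
        have hchain2 : List.IsChain (fun a b => ¬ (a - b).natAbs = 32) (l.take (i + 2)) := by
          rw [htake2, List.isChain_append]
          refine ⟨hc, List.isChain_singleton _, ?_⟩
          intro x hx y hy
          rw [htake, List.getLast?_concat] at hx
          simp at hx hy
          subst hx; subst hy
          exact hr
        rw [ih _ _ (by omega) hchain2]
        have h32 : ¬ (l[i + 1] - l[i]).natAbs = 32 := by omega
        have hpush : List.foldl stepH (l.take (i + 1)).reverse (l.drop (i + 1))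
            = List.foldl stepH (l.take (i + 2)).reverse (l.drop (i + 2)) := by
          rw [hdrop, hpop, List.foldl_cons, stepH, if_neg h32, htake2, List.reverse_append, ← hpop]
          rfl
        rw [hpush]
    · rw [dif_neg h]
      have hd : l.drop (i + 1) = [] := List.drop_eq_nil_iff.mpr (by omega)
      have ht : l.take (i + 1) = l := List.take_of_length_le (by omega)
      rw [hd, ht]
      simp

-- ===== VERDICT (by name: the statement is the Claim_ definition above) =====
theorem taskBhelper_spec : Claim_equal_taskBhelper := by
  intro data notC _
  simp only [Spec_taskBhelper, taskBhelper, taskBhelper_alt]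
  rw [foldA_eq_filter notC data.toList []]
  set F := data.toList.filter
      (fun c => decide ((pvOrd 'a' - pvOrd 'A') + pvOrd c ≠ notC ∧ pvOrd c ≠ notC)) with hF
  have hmem : ∀ c ∈ F, (pvOrd 'a' - pvOrd 'A') + pvOrd c ≠ notC ∧ pvOrd c ≠ notC := by
    intro c hcF
    rw [hF, List.mem_filter] at hcF
    exact of_decide_eq_true hcF.2
  have hrev := foldA_rev notC F [] hmem
  have hlen : (F.foldl (taskBhelperStep notC) []).length
      = (List.foldl stepH [] (F.map pvOrd)).length := by
    have := congrArg List.length hrev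
    simpa using this
  have hUF : F.map pvOrd
      = (data.toList.filter (fun c => decide (pvOrd c ≠ notC ∧ pvOrd c ≠ notC - 32))).map pvOrd := by
    rw [hF, filter_congr_keep]
  rw [hlen, hUF]
  rw [scan_eq_stack _ _ 0 (by omega) (isChain_take_one _ _), Nat.zero_add, ← foldH_shift]
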